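-- pv_equiv track=rewrite | github.com/facebookresearch/ParlAI | parlai/tasks/cmu_dog/agents.py | _collapse_multi_msgs
-- ===== SOURCE A (Python) =====
-- def _collapse_multi_msgs(history, multi_msg_delim):
--     """
--     This dataset allows for a single user to send multiple messages in a row.
--
--     Here we use a delimiter to represent this, like: "Hey!|Nice to meet you."
--     """
--     collapsed = []
--     last_msg = history[0]
--     for msg in history[1:]:
--         if last_msg["uid"] == msg["uid"]:
--             last_msg["text"] = multi_msg_delim.join((last_msg["text"], msg["text"]))
--         else:
--             collapsed.append(last_msg)
--             last_msg = msg
--     # don't forget to add back the last message!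
--     collapsed.append(last_msg)
--     return collapsed
-- ===== SOURCE B (Python) =====
-- def _collapse_multi_msgs(history, multi_msg_delim):
--     """Collapse consecutive same-uid messages, run by run.
--
--     Instead of A's single pass carrying a growing 'last_msg' accumulator and
--     re-joining the text incrementally, scan for each whole run [s, e) of equal
--     uids with an inner index loop and join all its texts at once.
--     Like A, mutates the first message of each multi-message run in place.
--     """
--     collapsed = []
--     n = len(history)
--     s = 0
--     while s < n:
--         first = history[s]
--         e = s + 1
--         while e < n and history[e]["uid"] == first["uid"]:
--             e += 1
--         if e > s + 1:
--             first["text"] = multi_msg_delim.join(m["text"] for m in history[s:e])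
--         collapsed.append(first)
--         s = e
--     return collapsed
-- ===== Notes on version B (the rewrite author's own statement) =====
-- stated objective: alternative
-- what changed: Replaces A's one-pass fold that carries a mutable last_msg and incrementally re-joins its text on every repeated message with a run-at-a-time scan: an inner index loop finds each maximal run of equal uids and its texts are joined once; this makes the per-run join linear instead of repeated pairwise joins (quadratic per run) though on typical short runs the cost is similar.
import Mathlib
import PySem

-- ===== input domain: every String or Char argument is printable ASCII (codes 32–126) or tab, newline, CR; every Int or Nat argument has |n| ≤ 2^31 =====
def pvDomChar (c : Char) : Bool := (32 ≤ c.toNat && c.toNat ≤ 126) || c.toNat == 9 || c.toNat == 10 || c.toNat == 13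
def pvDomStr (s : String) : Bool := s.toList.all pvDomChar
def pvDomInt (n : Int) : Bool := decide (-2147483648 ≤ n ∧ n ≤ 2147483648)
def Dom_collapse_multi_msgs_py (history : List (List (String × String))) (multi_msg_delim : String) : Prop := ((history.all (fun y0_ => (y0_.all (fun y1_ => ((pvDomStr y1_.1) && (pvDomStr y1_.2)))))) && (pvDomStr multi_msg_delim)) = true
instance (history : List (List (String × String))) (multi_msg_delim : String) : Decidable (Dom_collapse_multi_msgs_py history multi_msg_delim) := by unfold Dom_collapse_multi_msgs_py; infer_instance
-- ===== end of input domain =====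

-- B collapses the history run by run (inner scan per maximal equal-uid run, one join per run)
-- instead of A's single fold with an incrementally re-joined last_msg; return-value equivalence:
-- both Pythons also mutate the first message dict of each multi-message run in place (same final state).

-- shared dict-access helpers (msg["uid"], msg["text"], msg["text"] = v), used by both ports
def msgGet (m : List (String × String)) (k : String) : String := (PySem.Dict.mk m).getD k ""
def msgUid (m : List (String × String)) : String := msgGet m "uid"
def msgText (m : List (String × String)) : String := msgGet m "text"
def msgSetText (m : List (String × String)) (v : String) : List (String × String) :=
  ((PySem.Dict.mk m).insert "text" v).items

-- ===== PORT A =====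
-- the for-loop over history[1:], carrying (collapsed, last_msg), as structural recursion
def aLoop (delim : String) (collapsed : List (List (String × String)))
    (last : List (String × String)) : List (List (String × String)) → List (List (String × String))
  | [] => collapsed ++ [last]
  | msg :: rest =>
    if msgUid last == msgUid msg then
      aLoop delim collapsed (msgSetText last (PySem.Str.join delim [msgText last, msgText msg])) rest
    else
      aLoop delim (collapsed ++ [last]) msg rest

def collapse_multi_msgs_py (history : List (List (String × String))) (multi_msg_delim : String) : List (List (String × String)) :=
  match history with
  | [] => []                       -- Python raises IndexError at history[0]; excluded by Pre_
  | h :: t => aLoop multi_msg_delim [] h t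

-- ===== PORT B =====
-- the inner while loop 'e = s+1; while e < n and history[e]["uid"] == first["uid"]: e += 1'
-- counted on the suffix after first: e - (s+1)
def runLen (u : String) : List (List (String × String)) → Nat
  | [] => 0
  | m :: t => if msgUid m == u then runLen u t + 1 else 0

-- the outer while loop over s (advanced to e each turn) as recursion on the remaining suffix,
-- with a fuel counter (= initial length, always sufficient) making the recursion structural;
-- history[s:e] = first :: rest.take k, the next suffix is rest.drop k
def altGo : Nat → List (List (String × String)) → String → List (List (String × String))
  | _, [], _ => []
  | 0, _ :: _, _ => []          -- unreachable: fuel starts at history.length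
  | fuel + 1, first :: rest, delim =>
    let k := runLen (msgUid first) rest
    let first' := if 0 < k then
        msgSetText first (PySem.Str.join delim ((first :: rest.take k).map msgText))
      else first
    first' :: altGo fuel (rest.drop k) delim

def collapse_multi_msgs_py_alt (history : List (List (String × String))) (multi_msg_delim : String) : List (List (String × String)) :=
  altGo history.length history multi_msg_delim

-- ===== PRECONDITION & SPEC =====
-- Pre_ = exactly the inputs where the Python A returns: history nonempty (else IndexError),
-- every message has a "uid" key when there are ≥ 2 messages (A compares uids of all of them),
-- and both members of every adjacent equal-uid pair have a "text" key (A joins exactly those).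
def Pre_collapse_multi_msgs_py (history : List (List (String × String))) (multi_msg_delim : String) : Prop :=
  history ≠ [] ∧
  (2 ≤ history.length → ∀ m ∈ history, (PySem.Dict.mk m).contains "uid" = true) ∧
  (∀ p ∈ history.zip history.tail, msgUid p.1 = msgUid p.2 →
      (PySem.Dict.mk p.1).contains "text" = true ∧ (PySem.Dict.mk p.2).contains "text" = true)
instance (history : List (List (String × String))) (multi_msg_delim : String) : Decidable (Pre_collapse_multi_msgs_py history multi_msg_delim) := by unfold Pre_collapse_multi_msgs_py; infer_instance

def pvWitness_collapse_multi_msgs_py : (List (List (String × String))) × String :=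
  ([[("uid", "a"), ("text", "hi")], [("uid", "a"), ("text", "there")], [("uid", "b"), ("text", "yo")]], "|")

def Spec_collapse_multi_msgs_py (history : List (List (String × String))) (multi_msg_delim : String) (out : List (List (String × String))) : Prop := out = collapse_multi_msgs_py_alt history multi_msg_delim
instance (history : List (List (String × String))) (multi_msg_delim : String) (out : List (List (String × String))) : Decidable (Spec_collapse_multi_msgs_py history multi_msg_delim out) := by unfold Spec_collapse_multi_msgs_py; infer_instance

-- ===== CLAIM (what is proved, stated in full; the proofs are below) =====
def Claim_equal_collapse_multi_msgs_py : Prop := ∀ (history : List (List (String × String))) (multi_msg_delim : String), Dom_collapse_multi_msgs_py history multi_msg_delim → Pre_collapse_multi_msgs_py history multi_msg_delim → Spec_collapse_multi_msgs_py history multi_msg_delim (collapse_multi_msgs_py history multi_msg_delim)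
-- ===== LEMMAS AND PROOFS =====

theorem msgUid_setText (m : List (String × String)) (v : String) :
    msgUid (msgSetText m v) = msgUid m := by
  simp only [msgUid, msgGet, msgSetText]
  exact PySem.Dict.getD_insert_of_ne _ _ _ (by decide)

theorem msgText_setText (m : List (String × String)) (v : String) :
    msgText (msgSetText m v) = v := by
  simp only [msgText, msgGet, msgSetText]
  exact PySem.Dict.getD_insert_self _ _ _ _

theorem msgSetText_setText (m : List (String × String)) (v w : String) :
    msgSetText (msgSetText m v) w = msgSetText m w := by
  simp only [msgSetText]
  exact congrArg PySem.Dict.items (PySem.Dict.insert_insert_self _ _ _ _)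

theorem runLen_le (u : String) (l : List (List (String × String))) : runLen u l ≤ l.length := by
  induction l with
  | nil => simp [runLen]
  | cons m t ih => simp only [runLen]; split <;> simp <;> omega

-- A's incremental pairwise join equals the whole-run join
theorem join_pair_cons (d a b : String) (L : List String) (hL : L ≠ []) :
    PySem.Str.join d (PySem.Str.join d [a, b] :: L) = PySem.Str.join d (a :: b :: L) := by
  obtain ⟨c, L', rfl⟩ := List.exists_cons_of_ne_nil hL
  simp [PySem.Str.join, PySem.Chars.join_cons_cons]

theorem altGo_nil (fuel : Nat) (d : String) : altGo fuel [] d = [] := by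
  cases fuel <;> rfl

-- the fuel counter is irrelevant as long as it is sufficient
theorem altGo_fuel (d : String) :
    ∀ (fuel fuel' : Nat) (l : List (List (String × String))),
    l.length ≤ fuel → l.length ≤ fuel' → altGo fuel l d = altGo fuel' l d := by
  intro fuel
  induction fuel with
  | zero =>
    intro fuel' l h _
    have : l = [] := List.eq_nil_of_length_eq_zero (by omega)
    subst this
    simp [altGo_nil]
  | succ n ih =>
    intro fuel' l h h'
    match l, fuel' with
    | [], _ => simp [altGo_nil]
    | x :: xs, fuel'' + 1 =>
      simp only [altGo]
      congr 1
      apply ih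
      · have := runLen_le (msgUid x) xs
        simp at h ⊢
        omega
      · have := runLen_le (msgUid x) xs
        simp at h' ⊢
        omega

-- core invariant: the fold of A, started at (collapsed, last), produces collapsed ++ B's
-- run-by-run result of (last :: rest)
theorem aLoop_eq (delim : String) (rest : List (List (String × String))) :
    ∀ (collapsed : List (List (String × String))) (last : List (String × String)) (fuel : Nat),
    rest.length < fuel →
    aLoop delim collapsed last rest = collapsed ++ altGo fuel (last :: rest) delim := by
  induction rest with
  | nil =>
    intro collapsed last fuel hf
    match fuel with
    | f + 1 => simp [aLoop, altGo, runLen, altGo_nil]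
  | cons msg t ih =>
    intro collapsed last fuel hf
    match fuel with
    | f + 1 =>
    have hfle : t.length < f := by simp at hf; omega
    by_cases h : msgUid last = msgUid msg
    · rw [aLoop, if_pos (by simp [h]), ih _ _ f hfle]
      have hk : runLen (msgUid last) (msg :: t)
          = runLen (msgUid last) t + 1 := by simp [runLen, h]
      match f, hfle with
      | g + 1, _ =>
      simp only [altGo, msgUid_setText, hk]
      set k := runLen (msgUid last) t with hkdef
      have hdrop : (msg :: t).drop (k + 1) = t.drop k := rfl
      have htake : (msg :: t).take (k + 1) = msg :: t.take k := rfl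
      rw [hdrop, htake]
      rw [altGo_fuel delim g (g + 1) (t.drop k)
            (by simp; omega) (by simp; omega)]
      congr 1
      by_cases hk0 : 0 < k
      · rw [if_pos hk0, if_pos (by omega)]
        have ht_ne : t ≠ [] := by
          intro h1
          rw [h1] at hkdef
          simp [runLen] at hkdef
          omega
        simp only [List.map_cons, msgText_setText, msgSetText_setText]
        congr 1
        rw [join_pair_cons]
        simp [List.take_eq_nil_iff, ht_ne]
        omega
      · rw [if_neg hk0, if_pos (by omega)]
        have h0 : t.take k = [] := by
          have : k = 0 := by omega
          simp [this]
        simp [h0]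
    · rw [aLoop, if_neg (by simp [h]), ih _ _ f hfle]
      have hk : runLen (msgUid last) (msg :: t) = 0 := by
        simp [runLen]
        intro hc
        exact absurd hc.symm h
      simp only [altGo, hk]
      simp

-- ===== VERDICT (by name: the statement is the Claim_ definition above) =====
theorem collapse_multi_msgs_py_spec : Claim_equal_collapse_multi_msgs_py := by
  intro history delim _hdom hpre
  unfold Spec_collapse_multi_msgs_py
  obtain ⟨hne, -, -⟩ := hpre
  obtain ⟨h, t, rfl⟩ := List.exists_cons_of_ne_nil hne
  show aLoop delim [] h t = _
  rw [aLoop_eq delim t [] h (h :: t).length (by simp)]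
  rfl
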